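-- pv_equiv track=rewrite | github.com/thisisdinhvu/CS114.P11 | WECODE/Week 2/MAC_address.py | check
-- ===== SOURCE A (Python) =====
-- def valid(char):
--     return (char in 'ABCDEF1234657890')
--
-- def check(mac):
--     # if len(mac) > 1000 or ' ' in mac:
--     #     return False
--     # ps = mac.split('-')
--     # if len(ps) != 6:
--     #     return False
--     # for p in ps:
--     #     if len(p)!=2 or not all(char in valid_chars for char in p):
--     #         return False
--     # return True
--     if len(mac) != 17:
--         return False
--     for i in range(17):
--         if i % 3 == 2:
--             if mac[i] != '-':
--                 return False
--         else:
--             if not valid(mac[i]):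
--                 return False
--     return True
-- ===== SOURCE B (Python) =====
-- def check(mac):
--     parts = mac.split('-')
--     if len(parts) != 6:
--         return False
--     return all(len(p) == 2 and all(c in 'ABCDEF1234657890' for c in p) for p in parts)
-- ===== Notes on version B (the rewrite author's own statement) =====
-- stated objective: simpler
-- what changed: A walks all 17 positions with a single index loop and an i%3 case split; B splits the string on the dash separator into fields and validates that there are 6 fields of exactly 2 allowed characters each.
import Mathlib
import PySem

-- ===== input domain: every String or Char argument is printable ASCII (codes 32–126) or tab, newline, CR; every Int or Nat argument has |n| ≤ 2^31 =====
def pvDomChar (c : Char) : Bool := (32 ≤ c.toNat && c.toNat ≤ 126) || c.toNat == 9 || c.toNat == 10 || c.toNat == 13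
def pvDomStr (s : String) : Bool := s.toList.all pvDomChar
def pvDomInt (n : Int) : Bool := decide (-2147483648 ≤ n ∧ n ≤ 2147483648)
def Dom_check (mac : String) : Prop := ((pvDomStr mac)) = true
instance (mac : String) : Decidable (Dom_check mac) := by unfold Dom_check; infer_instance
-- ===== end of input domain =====

-- B replaces A's single 17-position modular-index loop by split-on-'-' then validate each of the 6 two-char fields (objective: simpler).

-- ===== PORT A =====
-- helper `valid(char)`: char in 'ABCDEF1234657890'
def pvValid (c : Char) : Bool := PySem.Chars.isIn [c] "ABCDEF1234657890".toList

-- the `for i in range(17)` loop with its early returns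
def pvCheckGo (cs : List Char) : List Int → Bool
  | [] => true
  | i :: rest =>
    if PySem.Int.mod i 3 = 2 then
      if PySem.List.pyGetD cs i ' ' ≠ '-' then false else pvCheckGo cs rest
    else
      if ¬ pvValid (PySem.List.pyGetD cs i ' ') then false else pvCheckGo cs rest

def check (mac : String) : Bool :=
  if PySem.Str.len mac ≠ 17 then false
  else pvCheckGo mac.toList (PySem.List.pyRange 0 17 1)

-- ===== PORT B =====
def check_alt (mac : String) : Bool :=
  let parts := PySem.Chars.splitOn mac.toList "-".toList
  if parts.length ≠ 6 then false
  else parts.all (fun p => p.length = 2 && p.all (fun c => PySem.Chars.isIn [c] "ABCDEF1234657890".toList))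

-- ===== PRECONDITION & SPEC =====
def Spec_check (mac : String) (out : Bool) : Prop := out = check_alt mac
instance (mac : String) (out : Bool) : Decidable (Spec_check mac out) := by unfold Spec_check; infer_instance

-- ===== CLAIM (what is proved, stated in full; the proofs are below) =====
def Claim_equal_check : Prop := ∀ (mac : String), Dom_check mac → Spec_check mac (check mac)

-- ===== LEMMAS AND PROOFS =====

-- PySem's fuel-based splitOn with a one-character separator is Mathlib's List.splitOn
theorem splitOn_go_eq (d : Char) (fuel : Nat) (l cur : List Char) (accs : List (List Char))
    (h : l.length ≤ fuel) :
    PySem.Chars.splitOn.go [d] fuel l cur accs =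
      accs.reverse ++ (List.splitOn d l).modifyHead (cur.reverse ++ ·) := by
  induction fuel generalizing l cur accs with
  | zero =>
    have hl : l = [] := List.eq_nil_of_length_eq_zero (Nat.le_zero.mp h)
    subst hl
    simp [PySem.Chars.splitOn.go, List.splitOn, List.splitOnP_nil]
  | succ n ih =>
    cases l with
    | nil => simp [PySem.Chars.splitOn.go, List.splitOn, List.splitOnP_nil]
    | cons c rest =>
      have hlen : rest.length ≤ n := by simpa using Nat.le_of_succ_le_succ h
      by_cases hc : c = d
      · subst hc
        rw [show PySem.Chars.splitOn.go [c] (n+1) (c :: rest) cur accs =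
            PySem.Chars.splitOn.go [c] n rest [] (cur.reverse :: accs) by
          simp [PySem.Chars.splitOn.go, List.isPrefixOf]]
        rw [ih rest [] (cur.reverse :: accs) hlen]
        simp only [List.splitOn]
        rw [List.splitOnP_cons]
        simp only [beq_self_eq_true, if_pos, List.modifyHead_cons, List.reverse_cons,
          List.reverse_nil, List.nil_append, List.append_assoc, List.cons_append]
        cases hne : List.splitOnP (fun x => x == c) rest with
        | nil => exact absurd hne (List.splitOnP_ne_nil _ _)
        | cons a t => simp
      · rw [show PySem.Chars.splitOn.go [d] (n+1) (c :: rest) cur accs =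
            PySem.Chars.splitOn.go [d] n rest (c :: cur) accs by
          have : ([d].isPrefixOf (c :: rest)) = false := by
            simp [List.isPrefixOf]; exact fun hd => absurd hd.symm hc
          simp [PySem.Chars.splitOn.go, this]]
        rw [ih rest (c :: cur) accs hlen]
        simp only [List.splitOn]
        rw [List.splitOnP_cons]
        have hbeq : (c == d) = false := by simpa using hc
        simp only [hbeq, if_neg, Bool.false_eq_true, not_false_iff, List.modifyHead_modifyHead]
        rw [← List.splitOn]
        cases hne : List.splitOn d rest with
        | nil => exact absurd hne (List.splitOnP_ne_nil _ _)
        | cons a t => simp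

theorem splitOn_singleton (d : Char) (l : List Char) :
    PySem.Chars.splitOn l [d] = List.splitOn d l := by
  rw [PySem.Chars.splitOn, splitOn_go_eq d (l.length+1) l [] [] (by omega)]
  cases hne : List.splitOn d l with
  | nil => exact absurd hne (List.splitOnP_ne_nil _ _)
  | cons a t => simp

theorem exists17 (cs : List Char) (h : cs.length = 17) :
    ∃ a0 a1 a2 a3 a4 a5 a6 a7 a8 a9 a10 a11 a12 a13 a14 a15 a16 : Char,
      cs = [a0,a1,a2,a3,a4,a5,a6,a7,a8,a9,a10,a11,a12,a13,a14,a15,a16] := by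
  rcases cs with _|⟨a0,cs⟩ <;> try simp at h
  rcases cs with _|⟨a1,cs⟩ <;> try simp at h
  rcases cs with _|⟨a2,cs⟩ <;> try simp at h
  rcases cs with _|⟨a3,cs⟩ <;> try simp at h
  rcases cs with _|⟨a4,cs⟩ <;> try simp at h
  rcases cs with _|⟨a5,cs⟩ <;> try simp at h
  rcases cs with _|⟨a6,cs⟩ <;> try simp at h
  rcases cs with _|⟨a7,cs⟩ <;> try simp at h
  rcases cs with _|⟨a8,cs⟩ <;> try simp at h
  rcases cs with _|⟨a9,cs⟩ <;> try simp at h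
  rcases cs with _|⟨a10,cs⟩ <;> try simp at h
  rcases cs with _|⟨a11,cs⟩ <;> try simp at h
  rcases cs with _|⟨a12,cs⟩ <;> try simp at h
  rcases cs with _|⟨a13,cs⟩ <;> try simp at h
  rcases cs with _|⟨a14,cs⟩ <;> try simp at h
  rcases cs with _|⟨a15,cs⟩ <;> try simp at h
  rcases cs with _|⟨a16,cs⟩ <;> try simp at h
  rcases cs with _|⟨a17,cs⟩
  · exact ⟨a0,a1,a2,a3,a4,a5,a6,a7,a8,a9,a10,a11,a12,a13,a14,a15,a16, rfl⟩
  · simp at h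

theorem exists2 (p : List Char) (h : p.length = 2) : ∃ x y : Char, p = [x, y] := by
  rcases p with _|⟨x,p⟩ <;> try simp at h
  rcases p with _|⟨y,p⟩ <;> try simp at h
  rcases p with _|⟨z,p⟩
  · exact ⟨x, y, rfl⟩
  · simp at h

theorem check_imp_alt (mac : String) (h : check mac = true) : check_alt mac = true := by
  unfold check at h
  split at h
  · exact absurd h (by simp)
  · rename_i hlen
    have h17 : mac.toList.length = 17 := by
      have := hlen; simp [PySem.Str.len_eq] at this; exact_mod_cast this
    obtain ⟨a0,a1,a2,a3,a4,a5,a6,a7,a8,a9,a10,a11,a12,a13,a14,a15,a16,hcs⟩ := exists17 _ h17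
    rw [show PySem.List.pyRange 0 17 1 = [0,1,2,3,4,5,6,7,8,9,10,11,12,13,14,15,16] from rfl] at h
    rw [hcs] at h
    simp [pvCheckGo, PySem.Int.mod, PySem.List.pyGetD, PySem.List.pyGet?, PySem.List.pyIdx?] at h
    obtain ⟨h0,h1,rfl,h3,h4,rfl,h6,h7,rfl,h9,h10,rfl,h12,h13,rfl,h15,h16⟩ := h
    have hsp : List.splitOn '-' mac.toList =
        [[a0,a1],[a3,a4],[a6,a7],[a9,a10],[a12,a13],[a15,a16]] := by
      rw [hcs]
      rw [show ([a0,a1,'-',a3,a4,'-',a6,a7,'-',a9,a10,'-',a12,a13,'-',a15,a16] : List Char) =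
        List.intercalate ['-'] [[a0,a1],[a3,a4],[a6,a7],[a9,a10],[a12,a13],[a15,a16]] by
          simp [List.intercalate]]
      refine List.splitOn_intercalate _ _ ?_ (by simp)
      intro l hl
      fin_cases hl <;> simp <;>
        exact ⟨by rintro rfl; exact absurd (by assumption : pvValid '-' = true) (by decide),
               by rintro rfl; exact absurd (by assumption : pvValid '-' = true) (by decide)⟩
    unfold check_alt
    rw [show ("-".toList : List Char) = ['-'] from rfl, splitOn_singleton '-' mac.toList, hsp]
    simp [pvValid] at h0 h1 h3 h4 h6 h7 h9 h10 h12 h13 h15 h16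
    simp [h0,h1,h3,h4,h6,h7,h9,h10,h12,h13,h15,h16]

theorem alt_imp_check (mac : String) (h : check_alt mac = true) : check mac = true := by
  unfold check_alt at h
  rw [show ("-".toList : List Char) = ['-'] from rfl, splitOn_singleton] at h
  replace h : (if (List.splitOn '-' mac.toList).length ≠ 6 then false
      else (List.splitOn '-' mac.toList).all fun p => decide (p.length = 2) &&
        p.all fun c => PySem.Chars.isIn [c] "ABCDEF1234657890".toList) = true := h
  split at h
  · exact absurd h (by simp)
  · rename_i hlen6
    have hlen6' : (List.splitOn '-' mac.toList).length = 6 := by omega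
    have hint : List.intercalate ['-'] (List.splitOn '-' mac.toList) = mac.toList :=
      List.intercalate_splitOn mac.toList '-'
    rcases hp : List.splitOn '-' mac.toList with _|⟨p0,ps⟩ <;> rw [hp] at hlen6' <;> try simp at hlen6'
    rcases ps with _|⟨p1,ps⟩ <;> try simp at hlen6'
    rcases ps with _|⟨p2,ps⟩ <;> try simp at hlen6'
    rcases ps with _|⟨p3,ps⟩ <;> try simp at hlen6'
    rcases ps with _|⟨p4,ps⟩ <;> try simp at hlen6'
    rcases ps with _|⟨p5,ps⟩ <;> try simp at hlen6'
    rcases ps with _|⟨p6,ps⟩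
    case cons.cons.cons.cons.cons.cons.cons => simp at hlen6'
    rw [hp] at h
    simp only [List.all_cons, List.all_nil, Bool.and_true, Bool.and_eq_true, decide_eq_true_eq] at h
    obtain ⟨⟨hl0,hh0⟩,⟨hl1,hh1⟩,⟨hl2,hh2⟩,⟨hl3,hh3⟩,⟨hl4,hh4⟩,⟨hl5,hh5⟩⟩ := h
    obtain ⟨x0,y0,rfl⟩ := exists2 _ hl0
    obtain ⟨x1,y1,rfl⟩ := exists2 _ hl1
    obtain ⟨x2,y2,rfl⟩ := exists2 _ hl2
    obtain ⟨x3,y3,rfl⟩ := exists2 _ hl3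
    obtain ⟨x4,y4,rfl⟩ := exists2 _ hl4
    obtain ⟨x5,y5,rfl⟩ := exists2 _ hl5
    rw [hp] at hint
    have hcs : mac.toList = [x0,y0,'-',x1,y1,'-',x2,y2,'-',x3,y3,'-',x4,y4,'-',x5,y5] := by
      rw [← hint]; simp [List.intercalate]
    simp only [List.all_cons, List.all_nil, Bool.and_true, Bool.and_eq_true] at hh0 hh1 hh2 hh3 hh4 hh5
    unfold check
    rw [if_neg (by simp [PySem.Str.len_eq, hcs])]
    rw [show PySem.List.pyRange 0 17 1 = [0,1,2,3,4,5,6,7,8,9,10,11,12,13,14,15,16] from rfl]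
    rw [hcs]
    simp [pvCheckGo, PySem.Int.mod, PySem.List.pyGetD, PySem.List.pyGet?, PySem.List.pyIdx?, pvValid]
    exact ⟨hh0.1, hh0.2, hh1.1, hh1.2, hh2.1, hh2.2, hh3.1, hh3.2, hh4.1, hh4.2, hh5.1, hh5.2⟩

-- ===== VERDICT (by name: the statement is the Claim_ definition above) =====
theorem check_spec : Claim_equal_check := by
  intro mac _
  unfold Spec_check
  cases hA : check mac with
  | true => exact (check_imp_alt mac hA).symm
  | false =>
    cases hB : check_alt mac with
    | true => exact absurd (alt_imp_check mac hB) (by simp [hA])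
    | false => rfl
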